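-- pv_equiv track=rewrite | github.com/AurelieEtier/PTM | ptm.py | reshapeListofList
-- ===== SOURCE A (Python) =====
-- def reshapeListofList(refList, flattedList):
--     indexes = [0]
--     reshapedList = []
--     for liste in refList:
--         indexes.append(indexes[-1] + len(liste))
--     for i in range(len(indexes) - 1):
--         reshapedList.append(flattedList[indexes[i]:indexes[i+1]])
--     return reshapedList
-- ===== SOURCE B (Python) =====
-- def reshapeListofList(refList, flattedList):
--     reshapedList = []
--     pos = 0
--     for liste in refList:
--         n = len(liste)
--         reshapedList.append(flattedList[pos:pos + n])
--         pos += n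
--     return reshapedList
-- ===== Notes on version B (the rewrite author's own statement) =====
-- stated objective: simpler
-- what changed: Replaces A's two-pass design (build a full offset table, then slice by pairwise indexing into it) with a single pass over refList that threads one running cursor and slices directly.
import Mathlib
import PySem

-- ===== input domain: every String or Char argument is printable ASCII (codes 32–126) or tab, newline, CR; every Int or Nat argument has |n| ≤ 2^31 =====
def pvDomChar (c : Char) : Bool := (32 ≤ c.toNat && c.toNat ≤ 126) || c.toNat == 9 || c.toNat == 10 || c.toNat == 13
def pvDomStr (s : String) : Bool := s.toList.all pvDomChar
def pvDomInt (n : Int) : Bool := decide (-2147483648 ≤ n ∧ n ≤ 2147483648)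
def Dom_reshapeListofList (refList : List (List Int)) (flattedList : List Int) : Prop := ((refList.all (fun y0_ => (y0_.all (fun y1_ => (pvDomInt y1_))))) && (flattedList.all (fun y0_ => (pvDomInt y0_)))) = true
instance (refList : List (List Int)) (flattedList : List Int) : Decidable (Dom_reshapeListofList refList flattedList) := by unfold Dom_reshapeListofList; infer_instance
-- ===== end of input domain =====

-- B replaces A's two-pass offset-table-then-slice structure with a single cursor-threaded pass (objective: simpler).

-- ===== PORT A =====
-- A: first loop builds the offset table `indexes`, second loop slices flattedList pairwise by it.
def reshapeListofList (refList : List (List Int)) (flattedList : List Int) : List (List Int) :=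
  let indexes := refList.foldl
    (fun idx liste => idx ++ [PySem.List.pyGetD idx (-1) 0 + (liste.length : Int)]) [0]
  (PySem.List.pyRange 0 ((indexes.length : Int) - 1) 1).foldl
    (fun acc i => acc ++ [PySem.List.slice flattedList
        (some (PySem.List.pyGetD indexes i 0)) (some (PySem.List.pyGetD indexes (i + 1) 0))]) []

-- ===== PORT B =====
-- B: one pass over refList, threading the running cursor `pos`.
def reshapeGo (flattedList : List Int) (pos : Int) : List (List Int) → List (List Int)
  | [] => []
  | liste :: rest =>
      PySem.List.slice flattedList (some pos) (some (pos + (liste.length : Int)))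
        :: reshapeGo flattedList (pos + (liste.length : Int)) rest

def reshapeListofList_alt (refList : List (List Int)) (flattedList : List Int) : List (List Int) :=
  reshapeGo flattedList 0 refList

-- ===== PRECONDITION & SPEC =====
def Spec_reshapeListofList (refList : List (List Int)) (flattedList : List Int) (out : List (List Int)) : Prop := out = reshapeListofList_alt refList flattedList
instance (refList : List (List Int)) (flattedList : List Int) (out : List (List Int)) : Decidable (Spec_reshapeListofList refList flattedList out) := by unfold Spec_reshapeListofList; infer_instance

-- ===== CLAIM (what is proved, stated in full; the proofs are below) =====
def Claim_equal_reshapeListofList : Prop := ∀ (refList : List (List Int)) (flattedList : List Int), Dom_reshapeListofList refList flattedList → Spec_reshapeListofList refList flattedList (reshapeListofList refList flattedList)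

-- ===== LEMMAS AND PROOFS =====

-- the offset table A builds, as a structural recursion
def idxList (p : Int) : List (List Int) → List Int
  | [] => [p]
  | liste :: rest => p :: idxList (p + (liste.length : Int)) rest

theorem idxList_head (p : Int) (l : List (List Int)) :
    idxList p l = p :: (idxList p l).tail := by
  cases l <;> rfl

theorem idxList_length (p : Int) (l : List (List Int)) :
    (idxList p l).length = l.length + 1 := by
  induction l generalizing p with
  | nil => rfl
  | cons a r ih => simp [idxList, ih]

theorem build_eq_idxList (refList : List (List Int)) (acc : List Int) (p : Int) :
    refList.foldl (fun idx liste => idx ++ [PySem.List.pyGetD idx (-1) 0 + (liste.length : Int)])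
        (acc ++ [p]) = acc ++ idxList p refList := by
  induction refList generalizing acc p with
  | nil => simp [idxList]
  | cons l r ih =>
      simp only [List.foldl_cons, PySem.List.pyGetD_neg_one_append_singleton, idxList]
      rw [show acc ++ [p] ++ [p + (l.length : Int)] = (acc ++ [p]) ++ [p + (l.length : Int)] from rfl,
          ih]
      simp

-- pairwise slicing of any index list, as a structural recursion
def pairRec (flat : List Int) : List Int → List (List Int)
  | a :: b :: r => PySem.List.slice flat (some a) (some b) :: pairRec flat (b :: r)
  | _ => []

theorem map_range_eq_pairRec (flat : List Int) (idx : List Int) :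
    (List.range (idx.length - 1)).map
      (fun k => PySem.List.slice flat (some (idx.getD k 0)) (some (idx.getD (k + 1) 0)))
      = pairRec flat idx := by
  match idx with
  | [] => rfl
  | [a] => rfl
  | a :: b :: r =>
      have ih := map_range_eq_pairRec flat (b :: r)
      simp only [List.length_cons, Nat.add_sub_cancel] at ih ⊢
      rw [List.range_succ_eq_map]
      simp only [List.map_cons, List.map_map]
      rw [pairRec]
      refine congrArg₂ List.cons rfl ?_
      rw [← ih]
      exact List.map_congr_left (fun k _ => rfl)

theorem pairRec_idxList (flat : List Int) (refList : List (List Int)) (p : Int) :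
    pairRec flat (idxList p refList) = reshapeGo flat p refList := by
  induction refList generalizing p with
  | nil => rfl
  | cons l r ih =>
      show pairRec flat (p :: idxList (p + (l.length : Int)) r) = _
      rw [idxList_head (p + (l.length : Int)) r, pairRec, ← idxList_head, ih]
      rfl

-- ===== VERDICT (by name: the statement is the Claim_ definition above) =====
theorem reshapeListofList_spec : Claim_equal_reshapeListofList := by
  intro refList flattedList _
  unfold Spec_reshapeListofList reshapeListofList reshapeListofList_alt
  have hbuild := build_eq_idxList refList [] 0
  simp only [List.nil_append] at hbuild
  rw [hbuild]
  rw [PySem.List.foldl_append_singleton_eq_map]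
  have hlen : ((idxList 0 refList).length : Int) - 1 = (refList.length : Int) := by
    rw [idxList_length]; push_cast; ring
  rw [hlen, PySem.List.pyRange_zero_natCast]
  rw [List.map_map]
  have hfun : ((fun i => PySem.List.slice flattedList
        (some (PySem.List.pyGetD (idxList 0 refList) i 0))
        (some (PySem.List.pyGetD (idxList 0 refList) (i + 1) 0))) ∘ (fun k : Nat => (k : Int)))
      = (fun k : Nat => PySem.List.slice flattedList
          (some ((idxList 0 refList).getD k 0)) (some ((idxList 0 refList).getD (k + 1) 0))) := by
    funext k
    simp only [Function.comp_apply]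
    have h1 : ((k : Int)) + 1 = (((k + 1 : Nat)) : Int) := by push_cast; ring
    rw [h1]
    simp only [PySem.List.pyGetD_natCast, List.getD]
  rw [hfun]
  have hlen2 : refList.length = (idxList 0 refList).length - 1 := by
    rw [idxList_length]; omega
  rw [hlen2, map_range_eq_pairRec, pairRec_idxList]
  simp
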